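-- pv_equiv track=rewrite | github.com/ArbitraryOstrich/CodeWars | Python/Moves in squared strings (II) [56dbe7f113c2f63570000b86]/selfie_and_rot.py | selfie_and_rot
-- ===== SOURCE A (Python) =====
-- def selfie_and_rot(s):
--     strings = s.split("\n")
--     inv_strings = strings[::-1]
--     dots = "." * len(strings[1])
--     for index in range(0, len(inv_strings)):
--         inv_strings[index] = inv_strings[index][::-1]
--     strings1 = f"{dots}\n".join(strings)
--     strings2 = f"\n{dots}".join(inv_strings)
--     return f"{strings1}{dots}\n{dots}{strings2}"
-- ===== SOURCE B (Python) =====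
-- def selfie_and_rot(s):
--     rows = s.split("\n")
--     dots = "." * len(rows[1])
--
--     def wrap(i):
--         # each row contributes its top line and, wrapping the recursion, its bottom line
--         if i == len(rows):
--             return []
--         return [rows[i] + dots] + wrap(i + 1) + [dots + rows[i][::-1]]
--
--     return "\n".join(wrap(0))
-- ===== Notes on version B (the rewrite author's own statement) =====
-- stated objective: alternative
-- what changed: B replaces A's staged construction (reverse the row list, an index loop reversing each row in place, two joins with dot-padded separators stitched by an f-string) with one recursive pass over the rows in which each row emits both its padded top line and, wrapping the recursive result, its mirrored bottom line, joined by a plain newline.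
import Mathlib
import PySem

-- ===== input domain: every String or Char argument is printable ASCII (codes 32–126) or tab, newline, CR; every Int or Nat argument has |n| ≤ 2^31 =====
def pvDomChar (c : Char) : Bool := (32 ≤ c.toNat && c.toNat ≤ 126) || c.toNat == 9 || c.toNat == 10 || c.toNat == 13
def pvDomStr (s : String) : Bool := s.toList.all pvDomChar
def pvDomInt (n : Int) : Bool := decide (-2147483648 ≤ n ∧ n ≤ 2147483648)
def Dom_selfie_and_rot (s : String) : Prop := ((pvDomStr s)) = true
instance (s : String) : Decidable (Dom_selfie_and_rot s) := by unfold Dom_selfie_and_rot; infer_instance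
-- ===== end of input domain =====

-- B builds the output in one recursive sandwich pass (each row emits its top line and wraps its bottom line
-- around the recursion) instead of A's reversed copy + in-place reversal loop + dot-padded-separator joins.

-- ===== PORT A =====
-- s.split("\n") → PySem.Chars.splitOn (sep is the nonempty literal "\n"); strings[1] → pyGet? (none = IndexError,
-- excluded by Pre_); xs[::-1] on a string ported as List.reverse (exact); the index loop mutating inv_strings in
-- place is ported as a foldl over pyRange doing List.modify at each index (exact: the indices 0..len-1 are nonneg).
def selfie_and_rot (s : String) : String :=
  let strings : List (List Char) := PySem.Chars.splitOn s.toList ['\n']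
  let inv_strings : List (List Char) := strings.reverse
  let dots : List Char := List.replicate ((PySem.List.pyGet? strings 1).getD []).length '.'
  let inv2 : List (List Char) :=
    (PySem.List.pyRange 0 inv_strings.length 1).foldl
      (fun acc i => acc.modify i.toNat List.reverse) inv_strings
  let strings1 : List Char := PySem.Chars.join (dots ++ ['\n']) strings
  let strings2 : List Char := PySem.Chars.join ('\n' :: dots) inv2
  String.ofList (strings1 ++ dots ++ ['\n'] ++ dots ++ strings2)

-- ===== PORT B =====
-- Source B's wrap(i) recurses over the row suffix; ported as structural recursion over the row list.
def pvWrapLines (d : List Char) : List (List Char) → List (List Char)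
  | [] => []
  | r :: rest => (r ++ d) :: (pvWrapLines d rest ++ [d ++ r.reverse])

def selfie_and_rot_alt (s : String) : String :=
  let rows : List (List Char) := PySem.Chars.splitOn s.toList ['\n']
  let dots : List Char := List.replicate ((PySem.List.pyGet? rows 1).getD []).length '.'
  String.ofList (PySem.Chars.join ['\n'] (pvWrapLines dots rows))

-- ===== PRECONDITION & SPEC =====
-- Pre_ excludes inputs with no newline (a single-line grid): there strings[1] raises IndexError in A (and in B).
def Pre_selfie_and_rot (s : String) : Prop :=
  2 ≤ (PySem.Chars.splitOn s.toList ['\n']).length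
instance (s : String) : Decidable (Pre_selfie_and_rot s) := by unfold Pre_selfie_and_rot; infer_instance
def pvWitness_selfie_and_rot : String := "ab\ncd"
def Spec_selfie_and_rot (s : String) (out : String) : Prop := out = selfie_and_rot_alt s
instance (s : String) (out : String) : Decidable (Spec_selfie_and_rot s out) := by unfold Spec_selfie_and_rot; infer_instance

-- ===== CLAIM (what is proved, stated in full; the proofs are below) =====
def Claim_equal_selfie_and_rot : Prop := ∀ (s : String), Dom_selfie_and_rot s → Pre_selfie_and_rot s → Spec_selfie_and_rot s (selfie_and_rot s)

-- ===== LEMMAS AND PROOFS =====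

theorem modify_app {α : Type} (l t : List α) (f : α → α) :
    (l ++ t).modify l.length f = l ++ t.modify 0 f := by
  induction l with
  | nil => simp
  | cons x l ih => simpa [List.modify] using ih

theorem foldl_modify_take {α : Type} (f : α → α) (xs : List α) (m : Nat) (hm : m ≤ xs.length) :
    (PySem.List.pyRange 0 (m:Int) 1).foldl (fun acc i => acc.modify i.toNat f) xs
      = (xs.take m).map f ++ xs.drop m := by
  induction m with
  | zero => simp [pysem]
  | succ m ih =>
    rw [show ((m+1 : Nat) : Int) = (m:Int) + 1 by push_cast; ring,
        PySem.List.pyRange_one_append 0 m ((m:Int)+1) (by positivity) (by omega),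
        List.foldl_append, ih (by omega)]
    have hr : PySem.List.pyRange (m:Int) ((m:Int)+1) 1 = [(m:Int)] := by
      rw [PySem.List.pyRange_one_cons (by omega)]; simp [pysem]
    rw [hr]
    simp only [List.foldl_cons, List.foldl_nil, Int.toNat_natCast]
    obtain ⟨y, t, ht⟩ : ∃ y t, xs.drop m = y :: t := by
      cases h : xs.drop m with
      | nil => exfalso; have := List.length_drop (l := xs) (i := m); rw [h] at this; simp at this; omega
      | cons y t => exact ⟨y, t, rfl⟩
    have hlen : ((xs.take m).map f).length = m := by simp; omega
    have happ := modify_app ((xs.take m).map f) (y :: t) f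
    rw [hlen] at happ
    rw [ht, happ, List.modify_zero_cons]
    have h1 : xs.take (m+1) = xs.take m ++ [y] := by
      rw [List.take_add_one]
      have : xs[m]? = some y := by
        have : (List.drop m xs)[0]? = xs[m+0]? := List.getElem?_drop
        simp [ht] at this; simpa using this.symm
      simp [this]
    have h2 : xs.drop (m+1) = t := by
      have : List.drop 1 (List.drop m xs) = List.drop (m+1) xs := by rw [List.drop_drop]
      rw [ht] at this; simpa using this.symm
    rw [h1, h2]; simp

-- A's in-place elementwise reversal loop computes the elementwise map
theorem foldl_modify_eq_map {α : Type} (f : α → α) (xs : List α) :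
    (PySem.List.pyRange 0 (xs.length:Int) 1).foldl (fun acc i => acc.modify i.toNat f) xs = xs.map f := by
  simpa using foldl_modify_take f xs xs.length le_rfl

-- join with separator (d ++ '\n') then a trailing d = plain '\n'-join of the rows each padded with d on the right
theorem join_pad_right (d : List Char) (l : List (List Char)) (hl : l ≠ []) :
    PySem.Chars.join (d ++ ['\n']) l ++ d
      = PySem.Chars.join ['\n'] (l.map (fun x => x ++ d)) := by
  induction l with
  | nil => simp at hl
  | cons r rest ih =>
    cases rest with
    | nil => simp [PySem.Chars.join_singleton]
    | cons q rest' =>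
      have ih' := ih (by simp)
      rw [List.map_cons] at ih'
      rw [PySem.Chars.join_cons_cons, List.map_cons, List.map_cons,
          PySem.Chars.join_cons_cons, ← ih']
      simp

-- leading d then join with separator ('\n' ++ d) = plain '\n'-join of the rows each padded with d on the left
theorem join_pad_left (d : List Char) (l : List (List Char)) (hl : l ≠ []) :
    d ++ PySem.Chars.join ('\n' :: d) l
      = PySem.Chars.join ['\n'] (l.map (fun x => d ++ x)) := by
  induction l with
  | nil => simp at hl
  | cons r rest ih =>
    cases rest with
    | nil => simp [PySem.Chars.join_singleton]
    | cons q rest' =>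
      have ih' := ih (by simp)
      rw [List.map_cons] at ih'
      rw [PySem.Chars.join_cons_cons, List.map_cons, List.map_cons,
          PySem.Chars.join_cons_cons, ← ih']
      simp

theorem join_append_nonempty (a b : List (List Char)) (ha : a ≠ []) (hb : b ≠ []) :
    PySem.Chars.join ['\n'] (a ++ b)
      = PySem.Chars.join ['\n'] a ++ '\n' :: PySem.Chars.join ['\n'] b := by
  induction a with
  | nil => simp at ha
  | cons r rest ih =>
    cases rest with
    | nil =>
      cases b with
      | nil => simp at hb
      | cons q b' => rw [List.singleton_append, PySem.Chars.join_cons_cons,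
                         PySem.Chars.join_singleton]; simp
    | cons q rest' =>
      rw [List.cons_append, List.cons_append, PySem.Chars.join_cons_cons,
          ← List.cons_append, ih (by simp), PySem.Chars.join_cons_cons]
      simp

-- B's sandwich recursion produces exactly top lines then mirrored bottom lines
theorem wrapLines_eq (d : List Char) (l : List (List Char)) :
    pvWrapLines d l = l.map (fun r => r ++ d) ++ l.reverse.map (fun r => d ++ r.reverse) := by
  induction l with
  | nil => simp [pvWrapLines]
  | cons r rest ih => simp [pvWrapLines, ih]

-- ===== VERDICT (by name: the statement is the Claim_ definition above) =====
theorem selfie_and_rot_spec : Claim_equal_selfie_and_rot := by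
  intro s _ hpre
  unfold Spec_selfie_and_rot selfie_and_rot selfie_and_rot_alt
  simp only []
  set rows := PySem.Chars.splitOn s.toList ['\n'] with hrows
  set d := List.replicate ((PySem.List.pyGet? rows 1).getD []).length '.' with hd
  have hne : rows ≠ [] := by
    intro h; unfold Pre_selfie_and_rot at hpre; rw [← hrows, h] at hpre; simp at hpre
  rw [foldl_modify_eq_map, wrapLines_eq]
  congr 1
  calc PySem.Chars.join (d ++ ['\n']) rows ++ d ++ ['\n'] ++ d
          ++ PySem.Chars.join ('\n' :: d) (rows.reverse.map List.reverse)
      = (PySem.Chars.join (d ++ ['\n']) rows ++ d) ++ '\n' ::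
          (d ++ PySem.Chars.join ('\n' :: d) (rows.reverse.map List.reverse)) := by simp
    _ = PySem.Chars.join ['\n'] (rows.map (fun x => x ++ d)) ++ '\n' ::
          PySem.Chars.join ['\n'] ((rows.reverse.map List.reverse).map (fun x => d ++ x)) := by
        rw [join_pad_right d rows hne, join_pad_left d _ (by simpa using hne)]
    _ = PySem.Chars.join ['\n']
          (rows.map (fun r => r ++ d) ++ rows.reverse.map (fun r => d ++ r.reverse)) := by
        rw [join_append_nonempty _ _ (by simpa using hne) (by simpa using hne), List.map_map]
        rfl
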